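-- pv_equiv track=rewrite | github.com/timsergor/StillPython | 319.py | circularPermutation
-- ===== SOURCE A (Python) =====
-- from typing import List
--
-- def circularPermutation(n: int, start: int) -> List[int]:
--     def solution(n):
--         if n == 1:
--             return [0, 1]
--         L = solution(n - 1)
--         R = list(L)
--         for i in range(len(R)):
--             R[i] += 2 ** (n - 1)
--         R.reverse()
--         return L + R
--
--     t = 0
--     S = solution(n)
--     while S[t] != start:
--         t += 1
--     return S[t:] + S[:t]
-- ===== SOURCE B (Python) =====
-- from typing import List
--
-- def circularPermutation(n: int, start: int) -> List[int]:
--     S = [j ^ (j >> 1) for j in range(2 ** n)]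
--     t = 0
--     while S[t] != start:
--         t += 1
--     return S[t:] + S[:t]
-- ===== Notes on version B (the rewrite author's own statement) =====
-- stated objective: alternative
-- what changed: Replaces the recursive reflected Gray-code construction (double, shift, reverse, concatenate) with the closed-form bit formula j ^ (j >> 1) over range(2**n); the rotation scan is unchanged.
import Mathlib
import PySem

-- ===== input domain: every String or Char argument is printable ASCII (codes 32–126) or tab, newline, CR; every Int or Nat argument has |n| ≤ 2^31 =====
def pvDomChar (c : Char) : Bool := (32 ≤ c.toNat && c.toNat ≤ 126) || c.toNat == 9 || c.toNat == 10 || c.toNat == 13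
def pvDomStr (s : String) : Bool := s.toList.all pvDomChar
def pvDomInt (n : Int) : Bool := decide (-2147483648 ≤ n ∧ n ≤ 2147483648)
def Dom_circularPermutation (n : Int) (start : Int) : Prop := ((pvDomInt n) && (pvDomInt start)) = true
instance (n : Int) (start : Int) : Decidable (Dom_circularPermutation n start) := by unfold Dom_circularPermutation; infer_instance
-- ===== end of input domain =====

-- B replaces A's recursive reflected construction of the Gray sequence by the closed-form
-- bit formula j ^^^ (j >>> 1); same rotation scan, same values (objective: alternative).

-- ===== PORT A =====
-- recursive reflected construction; for the Python argument n the fuel is n itself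
-- (Python recurses forever / RecursionError for n <= 0, excluded by Pre_; Nat case 0 is junk).
def pvSolutionA : Nat → List Int
  | 0 => []
  | Nat.succ m =>
    if m = 0 then [0, 1]
    else
      let L := pvSolutionA m
      let R := (L.map (· + 2 ^ m)).reverse   -- R = copy of L, each += 2**(n-1), reversed
      L ++ R

-- the while-loop scan: first index t with S[t] == start; none = IndexError
def pvScanA : List Int → Int → Option Nat
  | [], _ => none
  | x :: xs, s => if x = s then some 0 else (pvScanA xs s).map (· + 1)

def circularPermutation (n : Int) (start : Int) : List Int :=
  let S := pvSolutionA n.toNat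
  match pvScanA S start with
  | some t => S.drop t ++ S.take t
  | none => []

-- ===== PORT B =====
-- S = [j ^ (j >> 1) for j in range(2**n)]
def pvGrayB (n : Int) : List Int :=
  (List.range (2 ^ n.toNat)).map (fun j => ((j ^^^ (j >>> 1) : Nat) : Int))

def pvScanB : List Int → Int → Option Nat
  | [], _ => none
  | x :: xs, s => if x = s then some 0 else (pvScanB xs s).map (· + 1)

def circularPermutation_alt (n : Int) (start : Int) : List Int :=
  let S := pvGrayB n
  match pvScanB S start with
  | some t => S.drop t ++ S.take t
  | none => []

-- ===== PRECONDITION & SPEC =====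
-- A returns normally exactly when n >= 1 (else RecursionError) and start is one of the
-- Gray values 0 .. 2^n - 1 (else the while loop runs off the end: IndexError).
def Pre_circularPermutation (n : Int) (start : Int) : Prop :=
  1 ≤ n ∧ 0 ≤ start ∧ start < 2 ^ n.toNat

instance (n : Int) (start : Int) : Decidable (Pre_circularPermutation n start) := by
  unfold Pre_circularPermutation; infer_instance

def pvWitness_circularPermutation : Int × Int := (2, 3)

def Spec_circularPermutation (n : Int) (start : Int) (out : List Int) : Prop := out = circularPermutation_alt n start
instance (n : Int) (start : Int) (out : List Int) : Decidable (Spec_circularPermutation n start out) := by unfold Spec_circularPermutation; infer_instance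

-- ===== CLAIM (what is proved, stated in full; the proofs are below) =====
def Claim_equal_circularPermutation : Prop := ∀ (n : Int) (start : Int), Dom_circularPermutation n start → Pre_circularPermutation n start → Spec_circularPermutation n start (circularPermutation n start)

-- ===== LEMMAS AND PROOFS =====

theorem pvScan_eq (S : List Int) (s : Int) : pvScanA S s = pvScanB S s := by
  induction S with
  | nil => rfl
  | cons x xs ih => simp [pvScanA, pvScanB, ih]

theorem pv_shiftRight_xor (x y : Nat) : (x ^^^ y) >>> 1 = (x >>> 1) ^^^ (y >>> 1) := by
  apply Nat.eq_of_testBit_eq; intro i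
  simp [Nat.testBit_shiftRight, Nat.testBit_xor]

theorem pv_shiftRight_pred (s : Nat) : (2 ^ (s + 1) - 1) >>> 1 = 2 ^ s - 1 := by
  have h : 2 ^ (s + 1) = 2 * 2 ^ s := by ring
  simp only [Nat.shiftRight_succ, Nat.shiftRight_zero]
  omega

theorem pv_xor_two_pow (s : Nat) : ∀ x, x < 2 ^ s → x ^^^ 2 ^ s = x + 2 ^ s := by
  induction s with
  | zero => intro x hx; interval_cases x; decide
  | succ s ih =>
    intro x hx
    have hdiv : (x ^^^ 2 ^ (s + 1)) / 2 = x / 2 ^^^ 2 ^ s := by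
      have h2 : (2 ^ (s + 1)) >>> 1 = 2 ^ s := by
        simp only [Nat.shiftRight_succ, Nat.shiftRight_zero]
        omega
      have hthis := pv_shiftRight_xor x (2 ^ (s + 1))
      rw [h2] at hthis
      simpa [Nat.shiftRight_one] using hthis
    have hmod : (x ^^^ 2 ^ (s + 1)) % 2 = (x + 2 ^ (s + 1)) % 2 := Nat.xor_mod_two_eq
    have hx2 : x / 2 < 2 ^ s := by
      have : 2 ^ (s + 1) = 2 * 2 ^ s := by ring
      omega
    have hih := ih (x / 2) hx2
    have hsplit : x ^^^ 2 ^ (s + 1) = 2 * ((x ^^^ 2 ^ (s + 1)) / 2) + (x ^^^ 2 ^ (s + 1)) % 2 := by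
      omega
    have hpow : 2 ^ (s + 1) = 2 * 2 ^ s := by ring
    rw [hsplit, hdiv, hih, hmod]
    omega

theorem pv_xor_complement (s : Nat) : ∀ x, x < 2 ^ s → x ^^^ (2 ^ s - 1) = 2 ^ s - 1 - x := by
  induction s with
  | zero => intro x hx; interval_cases x; decide
  | succ s ih =>
    intro x hx
    have hdiv : (x ^^^ (2 ^ (s + 1) - 1)) / 2 = x / 2 ^^^ (2 ^ s - 1) := by
      have hthis := pv_shiftRight_xor x (2 ^ (s + 1) - 1)
      rw [pv_shiftRight_pred] at hthis
      simpa [Nat.shiftRight_one] using hthis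
    have hmod : (x ^^^ (2 ^ (s + 1) - 1)) % 2 = (x + (2 ^ (s + 1) - 1)) % 2 := Nat.xor_mod_two_eq
    have hpow : 2 ^ (s + 1) = 2 * 2 ^ s := by ring
    have hx2 : x / 2 < 2 ^ s := by omega
    have hih := ih (x / 2) hx2
    have hsplit : x ^^^ (2 ^ (s + 1) - 1) = 2 * ((x ^^^ (2 ^ (s + 1) - 1)) / 2) + (x ^^^ (2 ^ (s + 1) - 1)) % 2 := by
      omega
    rw [hsplit, hdiv, hih, hmod]
    have hp : 0 < 2 ^ s := Nat.two_pow_pos s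
    omega

-- the reflection identity: for i < 2^m, gray (2^m + i) = gray (2^m - 1 - i) + 2^m
theorem pv_gray_reflect (m i : Nat) (hi : i < 2 ^ m) :
    (2 ^ m + i) ^^^ ((2 ^ m + i) >>> 1)
      = ((2 ^ m - 1 - i) ^^^ ((2 ^ m - 1 - i) >>> 1)) + 2 ^ m := by
  set j := 2 ^ m - 1 - i with hj
  have hjlt : j < 2 ^ m := by have : 0 < 2 ^ m := Nat.two_pow_pos m; omega
  have hjlt' : j < 2 ^ (m + 1) := by
    have : 2 ^ (m + 1) = 2 * 2 ^ m := by ring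
    omega
  have hrepr : 2 ^ m + i = j ^^^ (2 ^ (m + 1) - 1) := by
    rw [pv_xor_complement (m + 1) j hjlt']
    have : 2 ^ (m + 1) = 2 * 2 ^ m := by ring
    omega
  rw [hrepr, pv_shiftRight_xor, pv_shiftRight_pred]
  have hM : (2 ^ (m + 1) - 1) = (2 ^ m - 1) ^^^ 2 ^ m := by
    rw [pv_xor_two_pow m (2 ^ m - 1) (by omega)]
    have : 2 ^ (m + 1) = 2 * 2 ^ m := by ring
    omega
  rw [hM]
  have hfj : j ^^^ j >>> 1 < 2 ^ m := by
    apply Nat.xor_lt_two_pow hjlt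
    calc j >>> 1 ≤ j := by simp [Nat.shiftRight_one]; omega
      _ < 2 ^ m := hjlt
  have hstep : j ^^^ ((2 ^ m - 1) ^^^ 2 ^ m) ^^^ (j >>> 1 ^^^ (2 ^ m - 1))
      = (j ^^^ j >>> 1) ^^^ 2 ^ m := by
    have h1 : ∀ a b c d : Nat, a ^^^ (b ^^^ c) ^^^ (d ^^^ b) = (a ^^^ d) ^^^ c := by
      intro a b c d
      apply Nat.eq_of_testBit_eq; intro k
      simp [Nat.testBit_xor]
      cases a.testBit k <;> cases b.testBit k <;> cases c.testBit k <;> cases d.testBit k <;> rfl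
    exact h1 j (2 ^ m - 1) (2 ^ m) (j >>> 1)
  rw [hstep, pv_xor_two_pow m _ hfj]

-- the construction lemma: A's reflected list equals B's closed form, for every fuel m ≥ 1
theorem pv_solution_eq_gray : ∀ m, 1 ≤ m →
    pvSolutionA m = (List.range (2 ^ m)).map (fun j => ((j ^^^ (j >>> 1) : Nat) : Int)) := by
  intro m
  induction m with
  | zero => omega
  | succ m ih =>
    intro _
    by_cases hm : m = 0
    · subst hm; decide
    · have h1 : 1 ≤ m := by omega
      have hL := ih h1
      show pvSolutionA (m + 1) = _
      have hpow : 2 ^ (m + 1) = 2 ^ m + 2 ^ m := by ring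
      rw [pvSolutionA]
      simp only [hm, if_false, hL]
      rw [hpow, List.range_add, List.map_append]
      congr 1
      -- reverse (map (· + 2^m) (map f (range 2^m))) = map f (map (2^m + ·) (range 2^m))
      apply List.ext_getElem
      · simp
      · intro i h₁ h₂
        simp only [List.length_reverse, List.length_map, List.length_range] at h₁ h₂
        simp only [List.getElem_reverse, List.getElem_map, List.length_map,
          List.length_range, List.getElem_range]
        have hrefl := pv_gray_reflect m i h₂
        rw [hrefl]
        push_cast
        ring_nf

theorem pv_ports_eq (n start : Int) (hn : 1 ≤ n) :
    circularPermutation n start = circularPermutation_alt n start := by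
  have hfuel : 1 ≤ n.toNat := by omega
  have hS : pvSolutionA n.toNat = pvGrayB n := by
    rw [pv_solution_eq_gray n.toNat hfuel]; rfl
  unfold circularPermutation circularPermutation_alt
  simp only [hS, pvScan_eq]

-- ===== VERDICT (by name: the statement is the Claim_ definition above) =====
theorem circularPermutation_spec : Claim_equal_circularPermutation := by
  intro n start _ hpre
  unfold Spec_circularPermutation
  exact pv_ports_eq n start hpre.1
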